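-- pv_equiv track=rewrite | github.com/Aryanamish/daily_practice | geeks/string/binary_string.py | binarySubstring
-- ===== SOURCE A (Python) =====
-- def binarySubstring(n, s):
--     ans = 0
--     ones = 0
--     for i in s:
--         if i == '1':
--             ans += ones
--             ones += 1
--
--     return ans
-- ===== SOURCE B (Python) =====
-- def binarySubstring(n, s):
--     k = s.count('1')
--     return k * (k - 1) // 2
-- ===== Notes on version B (the rewrite author's own statement) =====
-- stated objective: simpler
-- what changed: Replaces the incremental running-accumulator loop with a single s.count('1') followed by the closed-form pair count k*(k-1)//2.
import Mathlib
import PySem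

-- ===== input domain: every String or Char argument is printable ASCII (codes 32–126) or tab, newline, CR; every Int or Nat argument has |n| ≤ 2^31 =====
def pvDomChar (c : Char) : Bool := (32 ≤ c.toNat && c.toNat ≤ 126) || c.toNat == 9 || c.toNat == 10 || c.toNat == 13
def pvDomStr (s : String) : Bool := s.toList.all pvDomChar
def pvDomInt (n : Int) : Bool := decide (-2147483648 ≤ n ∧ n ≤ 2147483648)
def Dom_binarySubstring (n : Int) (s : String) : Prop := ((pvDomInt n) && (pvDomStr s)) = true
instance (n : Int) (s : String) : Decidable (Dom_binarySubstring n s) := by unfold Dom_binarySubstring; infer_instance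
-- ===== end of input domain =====

-- B replaces A's running-accumulator loop by counting the '1's once and the closed form k*(k-1)//2 (simpler).

-- ===== PORT A =====
-- loop 'for i in s: if i == '1': ans += ones; ones += 1' over state (ans, ones)
def binarySubstring (n : Int) (s : String) : Int :=
  (s.toList.foldl
    (fun (st : Int × Int) i => if i == '1' then (st.1 + st.2, st.2 + 1) else st)
    (0, 0)).1

-- ===== PORT B =====
-- k = s.count('1'); return k*(k-1)//2
def binarySubstring_alt (n : Int) (s : String) : Int :=
  let k : Int := (PySem.Str.count s "1" : Int)
  PySem.Int.floordiv (k * (k - 1)) 2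

-- ===== PRECONDITION & SPEC =====
def Spec_binarySubstring (n : Int) (s : String) (out : Int) : Prop := out = binarySubstring_alt n s
instance (n : Int) (s : String) (out : Int) : Decidable (Spec_binarySubstring n s out) := by unfold Spec_binarySubstring; infer_instance

-- ===== CLAIM (what is proved, stated in full; the proofs are below) =====
def Claim_equal_binarySubstring : Prop := ∀ (n : Int) (s : String), Dom_binarySubstring n s → Spec_binarySubstring n s (binarySubstring n s)

-- ===== LEMMAS AND PROOFS =====

-- Str.count with a single-character needle is the character count.
theorem countGo_single (c : Char) :
    ∀ (l : List Char) (fuel acc : Nat), l.length ≤ fuel →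
      PySem.Chars.count.go [c] fuel l acc = acc + l.count c := by
  intro l
  induction l with
  | nil =>
      intro fuel acc _
      cases fuel <;> simp [PySem.Chars.count.go]
  | cons h t ih =>
      intro fuel acc hle
      cases fuel with
      | zero => simp at hle
      | succ f =>
          simp only [PySem.Chars.count.go]
          by_cases hc : h = c
          · subst hc
            simp only [List.isPrefixOf, beq_self_eq_true,
              Bool.true_and, if_pos]
            simp only [List.length_cons] at hle
            rw [show [h].length = 1 from rfl, List.drop_one, List.tail_cons,
              ih f (acc + 1) (by omega)]
            simp; omega
          · have : ([c].isPrefixOf (h :: t)) = false := by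
              simp [List.isPrefixOf]
              exact fun hb => hc hb.symm
            rw [this]
            simp only [Bool.false_eq_true, if_false]
            simp only [List.length_cons] at hle
            rw [ih f acc (by omega)]
            simp [hc]

theorem count_single (c : Char) (l : List Char) :
    PySem.Chars.count l [c] = l.count c := by
  simp [PySem.Chars.count]
  simpa using countGo_single c l l.length 0 le_rfl

-- A's loop computes the binomial coefficient of the running count of '1's.
theorem foldA_closed (l : List Char) :
    ∀ (a o : Int),
      l.foldl (fun (st : Int × Int) i => if i == '1' then (st.1 + st.2, st.2 + 1) else st) (a, o)
        = (a + o * (l.count '1' : Int) + ((l.count '1').choose 2 : Int),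
           o + (l.count '1' : Int)) := by
  induction l with
  | nil => intro a o; simp
  | cons h t ih =>
      intro a o
      by_cases hc : h = '1'
      · subst hc
        simp only [List.foldl_cons, beq_self_eq_true, if_pos, List.count_cons_self]
        rw [ih (a + o) (o + 1)]
        have hch : (t.count '1' + 1).choose 2 = t.count '1' + (t.count '1').choose 2 := by
          rw [Nat.choose_succ_succ, Nat.choose_one_right]
        simp only [Prod.mk.injEq]
        constructor <;> · push_cast [hch]; ring
      · simp only [List.foldl_cons]
        rw [if_neg (by simp [hc]), ih a o, List.count_cons_of_ne hc]

-- casting the closed form through floor division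
theorem choose_two_floordiv (c : Nat) :
    PySem.Int.floordiv ((c : Int) * ((c : Int) - 1)) 2 = (c.choose 2 : Int) := by
  have hprod : (c : Int) * ((c : Int) - 1) = ((c * (c - 1) : Nat) : Int) := by
    cases c with
    | zero => simp
    | succ m => push_cast [Nat.succ_sub_one]; ring
  rw [hprod, PySem.Int.floordiv, Int.fdiv_eq_ediv, if_pos (Or.inl (by norm_num)), sub_zero,
    show (2 : Int) = ((2 : Nat) : Int) from rfl, ← Int.natCast_div, Nat.choose_two_right]

-- ===== VERDICT (by name: the statement is the Claim_ definition above) =====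
theorem binarySubstring_spec : Claim_equal_binarySubstring := by
  intro n s _
  unfold Spec_binarySubstring binarySubstring binarySubstring_alt
  rw [foldA_closed]
  simp only [PySem.Str.count, show ("1" : String).toList = ['1'] from rfl, count_single,
    choose_two_floordiv]
  ring
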